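-- pv_equiv track=rewrite | github.com/MrHamdulay/csc3-capstone | examples/data/Assignment_8/plsnor001/question2.py | message
-- ===== SOURCE A (Python) =====
-- def message(word):
--     if len(word) < 2:
--         return 0
--
--     else:
--         if word[0]==word[1]:
--             return 1 + message(word[2:])
--
--         else:
--             return message(word[1:])
-- ===== SOURCE B (Python) =====
-- def message(word):
--     count = 0
--     i = 0
--     n = len(word)
--     while i < n - 1:
--         if word[i] == word[i + 1]:
--             count += 1
--             i += 2
--         else:
--             i += 1
--     return count
-- ===== Notes on version B (the rewrite author's own statement) =====
-- stated objective: faster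
-- what changed: Replaces A's recursion with repeated string slicing (each call copies the tail) by a single index-based while loop that advances 2 on a matched pair and 1 otherwise, with a running counter.
import Mathlib
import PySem

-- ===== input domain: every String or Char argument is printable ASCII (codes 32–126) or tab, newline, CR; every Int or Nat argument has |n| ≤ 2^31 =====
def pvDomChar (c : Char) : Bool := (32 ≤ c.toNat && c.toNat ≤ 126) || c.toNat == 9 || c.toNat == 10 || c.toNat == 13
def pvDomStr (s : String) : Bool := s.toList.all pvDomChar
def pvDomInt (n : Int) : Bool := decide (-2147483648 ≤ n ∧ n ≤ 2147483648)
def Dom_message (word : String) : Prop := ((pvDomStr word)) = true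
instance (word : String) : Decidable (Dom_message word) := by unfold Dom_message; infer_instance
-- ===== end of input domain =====

-- B replaces A's slice-copying recursion by a single index-based loop; faster (O(n) vs O(n^2)).

-- ===== PORT A =====
-- A's recursion on word[2:] / word[1:]: structural recursion on the character list.
def messageRec : List Char → Int
  | a :: b :: rest => if a == b then 1 + messageRec rest else messageRec (b :: rest)
  | _ => 0

def message (word : String) : Int := messageRec word.toList

-- ===== PORT B =====
-- B's while loop: index i, advance 2 on match else 1, running count.
def messageLoop (cs : List Char) (i : Nat) (count : Int) : Int :=
  if h : i + 1 < cs.length then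
    if cs[i] == cs[i + 1] then messageLoop cs (i + 2) (count + 1)
    else messageLoop cs (i + 1) count
  else count
termination_by cs.length - i

def message_alt (word : String) : Int := messageLoop word.toList 0 0

-- ===== PRECONDITION & SPEC =====
def Spec_message (word : String) (out : Int) : Prop := out = message_alt word
instance (word : String) (out : Int) : Decidable (Spec_message word out) := by unfold Spec_message; infer_instance

-- ===== CLAIM (what is proved, stated in full; the proofs are below) =====
def Claim_equal_message : Prop := ∀ (word : String), Dom_message word → Spec_message word (message word)

-- ===== LEMMAS AND PROOFS =====

theorem messageRec_short (l : List Char) (h : l.length < 2) : messageRec l = 0 := by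
  match l with
  | [] => rfl
  | [_] => rfl
  | _ :: _ :: _ => simp at h

theorem messageLoop_eq (cs : List Char) (i : Nat) (c : Int) :
    messageLoop cs i c = c + messageRec (cs.drop i) := by
  by_cases h : i + 1 < cs.length
  · have hi : i < cs.length := by omega
    have hi1 : i + 1 < cs.length := h
    have hd : cs.drop i = cs[i] :: cs[i + 1] :: cs.drop (i + 2) := by
      rw [List.drop_eq_getElem_cons hi, List.drop_eq_getElem_cons hi1]
    rw [messageLoop]
    simp only [hd, h, dif_pos]
    by_cases hc : cs[i] == cs[i + 1]
    · rw [if_pos hc, messageLoop_eq cs (i + 2) (c + 1), messageRec, if_pos hc]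
      ring
    · rw [if_neg hc, messageLoop_eq cs (i + 1) c, messageRec, if_neg hc,
        List.drop_eq_getElem_cons hi1]
  · rw [messageLoop, dif_neg h, messageRec_short _ (by simp; omega)]
    ring
termination_by cs.length - i

-- ===== VERDICT (by name: the statement is the Claim_ definition above) =====
theorem message_spec : Claim_equal_message := by
  intro word _
  unfold Spec_message message message_alt
  rw [messageLoop_eq]
  simp
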